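-- pv_equiv track=rewrite | github.com/chinnichaitanya/spellwise | spellwise/algorithms/editex.py | _letters_in_group
-- ===== SOURCE A (Python) =====
-- def _letters_in_group(a: str, b: str) -> bool:
--     """Determine if the letters are in the same group or not
--
--     Args:
--         a (str): First letter
--         b (str): Second letter
--
--     Returns:
--         bool: Whether the letters belong to the same group or not
--     """
--
--     value_a = 0
--     value_b = 0
--     for power, group in enumerate(
--         [
--             ("a", "e", "i", "o", "u", "y"),
--             ("b", "p"),
--             ("c", "k", "q"),
--             ("d", "t"),
--             ("l", "r"),
--             ("m", "n"),
--             ("g", "j"),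
--             ("f", "p", "v"),
--             ("x", "s", "z"),
--             ("c", "s", "z"),
--         ]
--     ):
--         if a in group:
--             value_a += pow(2, power)
--         if b in group:
--             value_b += pow(2, power)
--
--     if (value_a & value_b) > 0:
--         return True
--     else:
--         return False
-- ===== SOURCE B (Python) =====
-- _GROUPS = [
--     ("a", "e", "i", "o", "u", "y"),
--     ("b", "p"),
--     ("c", "k", "q"),
--     ("d", "t"),
--     ("l", "r"),
--     ("m", "n"),
--     ("g", "j"),
--     ("f", "p", "v"),
--     ("x", "s", "z"),
--     ("c", "s", "z"),
-- ]
--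
-- _GROUP_INDEX = {}
-- for _i, _g in enumerate(_GROUPS):
--     for _ch in _g:
--         _GROUP_INDEX.setdefault(_ch, set()).add(_i)
--
--
-- def _letters_in_group(a: str, b: str) -> bool:
--     """Whether the two letters share an Editex group (index-table version)."""
--     return bool(_GROUP_INDEX.get(a, set()) & _GROUP_INDEX.get(b, set()))
-- ===== Notes on version B (the rewrite author's own statement) =====
-- stated objective: simpler
-- what changed: Replaces the two power-of-two bitmask accumulators and the final bitwise AND with a letter-to-group-index table built once from the groups, answered by a set intersection of the two letters' index sets.
import Mathlib
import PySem

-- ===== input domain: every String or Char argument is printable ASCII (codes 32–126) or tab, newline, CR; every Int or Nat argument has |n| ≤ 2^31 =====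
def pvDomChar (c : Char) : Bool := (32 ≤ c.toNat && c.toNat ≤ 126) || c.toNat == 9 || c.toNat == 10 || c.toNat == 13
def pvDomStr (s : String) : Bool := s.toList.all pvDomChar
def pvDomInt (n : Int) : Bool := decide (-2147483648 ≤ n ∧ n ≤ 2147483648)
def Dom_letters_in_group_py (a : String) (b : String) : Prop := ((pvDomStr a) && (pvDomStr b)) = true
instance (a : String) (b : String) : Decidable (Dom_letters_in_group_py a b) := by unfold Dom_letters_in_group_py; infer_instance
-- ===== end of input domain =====

-- B replaces A's two power-of-two bitmask accumulators with a letter→group-index table built once, answered by a set intersection (objective: simpler).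


-- the ten Editex groups, shared verbatim by both ports
def editexGroups : List (List String) :=
  [["a","e","i","o","u","y"], ["b","p"], ["c","k","q"], ["d","t"], ["l","r"],
   ["m","n"], ["g","j"], ["f","p","v"], ["x","s","z"], ["c","s","z"]]

-- ===== PORT A =====
-- A's loop: value_a/value_b accumulate 2^power for each group containing the letter
def editexValues (a : String) (b : String) : Int × Int :=
  (PySem.List.enumerate editexGroups).foldl
    (fun (vs : Int × Int) pg =>
      let vs := if a ∈ pg.2 then (vs.1 + 2 ^ pg.1.toNat, vs.2) else vs
      if b ∈ pg.2 then (vs.1, vs.2 + 2 ^ pg.1.toNat) else vs)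
    (0, 0)

def letters_in_group_py (a : String) (b : String) : Bool :=
  decide (PySem.Int.band (editexValues a b).1 (editexValues a b).2 > 0)

-- ===== PORT B =====
-- B's table: letter → set of indices of the groups containing it (built once, as in Source B)
def groupIndex : PySem.Dict String (PySem.Set Int) :=
  (PySem.List.enumerate editexGroups).foldl
    (fun d ig => ig.2.foldl
      (fun d ch => PySem.Dict.modify d ch PySem.Set.empty (fun s => s.add ig.1)) d)
    PySem.Dict.empty

def letters_in_group_py_alt (a : String) (b : String) : Bool :=
  decide (PySem.Set.inter (groupIndex.getD a PySem.Set.empty)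
            (groupIndex.getD b PySem.Set.empty) ≠ [])

-- ===== PRECONDITION & SPEC =====
def Spec_letters_in_group_py (a : String) (b : String) (out : Bool) : Prop := out = letters_in_group_py_alt a b
instance (a : String) (b : String) (out : Bool) : Decidable (Spec_letters_in_group_py a b out) := by unfold Spec_letters_in_group_py; infer_instance

-- ===== CLAIM (what is proved, stated in full; the proofs are below) =====
def Claim_equal_letters_in_group_py : Prop := ∀ (a : String) (b : String), Dom_letters_in_group_py a b → Spec_letters_in_group_py a b (letters_in_group_py a b)

-- ===== LEMMAS AND PROOFS =====

-- every letter occurring in any group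
def allLetters : List String :=
  ["a","e","i","o","u","y","b","p","c","k","q","d","t","l","r","m","n","g","j","f","v","x","s","z"]

-- A's pair-fold decouples into two independent folds
theorem editex_fold_fst (a b : String) (l : List (Int × List String)) (x y : Int) :
    (l.foldl
      (fun (vs : Int × Int) pg =>
        let vs := if a ∈ pg.2 then (vs.1 + 2 ^ pg.1.toNat, vs.2) else vs
        if b ∈ pg.2 then (vs.1, vs.2 + 2 ^ pg.1.toNat) else vs)
      (x, y)).1
    = l.foldl (fun v pg => if a ∈ pg.2 then v + 2 ^ pg.1.toNat else v) x := by
  induction l generalizing x y with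
  | nil => rfl
  | cons p t ih => simp only [List.foldl_cons]; split_ifs <;> simp [ih]

theorem editex_fold_snd (a b : String) (l : List (Int × List String)) (x y : Int) :
    (l.foldl
      (fun (vs : Int × Int) pg =>
        let vs := if a ∈ pg.2 then (vs.1 + 2 ^ pg.1.toNat, vs.2) else vs
        if b ∈ pg.2 then (vs.1, vs.2 + 2 ^ pg.1.toNat) else vs)
      (x, y)).2
    = l.foldl (fun v pg => if b ∈ pg.2 then v + 2 ^ pg.1.toNat else v) y := by
  induction l generalizing x y with
  | nil => rfl
  | cons p t ih => simp only [List.foldl_cons]; split_ifs <;> simp [ih]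

theorem editexValues_fst_zero (a b : String) (ha : a ∉ allLetters) :
    (editexValues a b).1 = 0 := by
  unfold editexValues
  rw [editex_fold_fst]
  simp [allLetters] at ha
  obtain ⟨h1,h2,h3,h4,h5,h6,h7,h8,h9,h10,h11,h12,h13,h14,h15,h16,h17,h18,h19,h20,h21,h22,h23,h24⟩ := ha
  simp [editexGroups, PySem.List.enumerate_cons, PySem.List.enumerate_nil,
    h1,h2,h3,h4,h5,h6,h7,h8,h9,h10,h11,h12,h13,h14,h15,h16,h17,h18,h19,h20,h21,h22,h23,h24]

theorem editexValues_snd_zero (a b : String) (hb : b ∉ allLetters) :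
    (editexValues a b).2 = 0 := by
  unfold editexValues
  rw [editex_fold_snd]
  simp [allLetters] at hb
  obtain ⟨h1,h2,h3,h4,h5,h6,h7,h8,h9,h10,h11,h12,h13,h14,h15,h16,h17,h18,h19,h20,h21,h22,h23,h24⟩ := hb
  simp [editexGroups, PySem.List.enumerate_cons, PySem.List.enumerate_nil,
    h1,h2,h3,h4,h5,h6,h7,h8,h9,h10,h11,h12,h13,h14,h15,h16,h17,h18,h19,h20,h21,h22,h23,h24]

theorem A_false_left (a b : String) (ha : a ∉ allLetters) :
    letters_in_group_py a b = false := by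
  unfold letters_in_group_py
  rw [editexValues_fst_zero a b ha, PySem.Int.band_comm, PySem.Int.band_zero]
  simp

theorem A_false_right (a b : String) (hb : b ∉ allLetters) :
    letters_in_group_py a b = false := by
  unfold letters_in_group_py
  rw [editexValues_snd_zero a b hb, PySem.Int.band_zero]
  simp

theorem groupIndex_keys : groupIndex.keys = allLetters := by decide

theorem getD_groupIndex_not_letter (a : String) (ha : a ∉ allLetters) :
    groupIndex.getD a PySem.Set.empty = [] := by
  apply PySem.Dict.getD_of_not_contains
  rw [PySem.Dict.contains_eq_decide_mem_keys, groupIndex_keys]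
  simpa using ha

theorem B_false_left (a b : String) (ha : a ∉ allLetters) :
    letters_in_group_py_alt a b = false := by
  unfold letters_in_group_py_alt
  rw [getD_groupIndex_not_letter a ha]
  simp [PySem.Set.inter]

theorem B_false_right (a b : String) (hb : b ∉ allLetters) :
    letters_in_group_py_alt a b = false := by
  unfold letters_in_group_py_alt
  rw [getD_groupIndex_not_letter b hb]
  simp [PySem.Set.inter]

-- ===== VERDICT (by name: the statement is the Claim_ definition above) =====
set_option maxHeartbeats 2000000 in
theorem letters_in_group_py_spec : Claim_equal_letters_in_group_py := by
  intro a b _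
  unfold Spec_letters_in_group_py
  by_cases ha : a ∈ allLetters
  · by_cases hb : b ∈ allLetters
    · fin_cases ha <;> fin_cases hb <;> rfl
    · rw [A_false_right a b hb, B_false_right a b hb]
  · rw [A_false_left a b ha, B_false_left a b ha]
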